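-- pv_equiv track=rewrite | github.com/CosminHorjea/AoC | 2015/15day6.py | part1
-- ===== SOURCE A (Python) =====
-- def part1(input):
-- 	lights = [[0 for x in range(1000)] for y in range(1000)]
-- 	for line in input:
-- 		instruction = line.split()
-- 		if instruction[0] == 'turn':
-- 			if instruction[1] == 'on':
-- 				for i in range(int(instruction[2].split(',')[0]), int(instruction[4].split(',')[0]) + 1):
-- 					for j in range(int(instruction[2].split(',')[1]), int(instruction[4].split(',')[1]) + 1):
-- 						lights[i][j] = 1
-- 			elif instruction[1] == 'off':
-- 				for i in range(int(instruction[2].split(',')[0]), int(instruction[4].split(',')[0]) + 1):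
-- 					for j in range(int(instruction[2].split(',')[1]), int(instruction[4].split(',')[1]) + 1):
-- 						if lights[i][j] > 0:
-- 							lights[i][j] = 0
-- 		elif instruction[0] == 'toggle':
-- 			for i in range(int(instruction[1].split(',')[0]), int(instruction[3].split(',')[0]) + 1):
-- 				for j in range(int(instruction[1].split(',')[1]), int(instruction[3].split(',')[1]) + 1):
-- 					lights[i][j] = 1 - lights[i][j]
-- 	total = 0
-- 	for i in range(1000):
-- 		for j in range(1000):
-- 			total += lights[i][j]
-- 	return total
-- ===== SOURCE B (Python) =====
-- FULL = (1 << 1000) - 1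
--
--
-- def _popcount(r):
--     c = 0
--     while r:
--         c += r & 1
--         r >>= 1
--     return c
--
--
-- def part1(input):
--     # one 1000-bit integer per row: a rectangle op touches each row once with a
--     # column bitmask (on = OR, off = AND-NOT, toggle = XOR); count by popcount.
--     rows = [0] * 1000
--     for line in input:
--         w = line.split()
--         if w[:2] == ['turn', 'on']:
--             op, c1, c2 = 'on', w[2], w[4]
--         elif w[:2] == ['turn', 'off']:
--             op, c1, c2 = 'off', w[2], w[4]
--         elif w[:1] == ['toggle']:
--             op, c1, c2 = 'toggle', w[1], w[3]
--         else:
--             continue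
--         p, q = c1.split(','), c2.split(',')
--         x1, y1, x2, y2 = int(p[0]), int(p[1]), int(q[0]), int(q[1])
--         mask = ((1 << (y2 - y1 + 1)) - 1) << y1 if 0 <= y1 <= y2 else 0
--         for i in range(x1, x2 + 1):
--             if op == 'on':
--                 rows[i] |= mask
--             elif op == 'off':
--                 rows[i] &= FULL ^ mask
--             else:
--                 rows[i] ^= mask
--     total = 0
--     for i in range(1000):
--         total += _popcount(rows[i])
--     return total
-- ===== Notes on version B (the rewrite author's own statement) =====
-- stated objective: alternative
-- what changed: B stores each grid row as one 1000-bit integer instead of a list of 1000 cells: a rectangle op touches each row once with a precomputed column bitmask (on = OR, off = AND with the complemented mask, toggle = XOR), and lit cells are counted by per-row popcount instead of A's per-cell double loop.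
-- outside the precondition, e.g. on part1(['turn on 0,-1 through 0,-1']): A returns 1, B returns 0
import Mathlib
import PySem

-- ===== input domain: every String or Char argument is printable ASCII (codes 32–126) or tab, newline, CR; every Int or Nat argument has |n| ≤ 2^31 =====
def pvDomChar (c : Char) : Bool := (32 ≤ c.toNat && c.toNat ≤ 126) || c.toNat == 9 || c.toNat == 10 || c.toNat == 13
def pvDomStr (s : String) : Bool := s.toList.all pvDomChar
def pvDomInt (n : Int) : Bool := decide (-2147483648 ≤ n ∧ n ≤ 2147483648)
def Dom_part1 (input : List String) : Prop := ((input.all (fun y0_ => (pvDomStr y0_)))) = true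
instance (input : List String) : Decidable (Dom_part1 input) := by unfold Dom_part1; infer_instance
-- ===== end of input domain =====

-- B replaces A's 2D grid of cells by one 1000-bit integer per row: a rectangle op touches each
-- row once with a column bitmask (on = OR, off = AND-NOT, toggle = XOR) and lit cells are
-- counted by per-row popcount instead of A's per-cell double loop.

-- shared coordinate parser: int(w.split(',')[0]), int(w.split(',')[1])  (used by both ports and by Pre_)
def pvCoord? (w : String) : Option (Int × Int) :=
  let parts := (PySem.Str.split? w ",").getD []    -- ',' is never empty, so split? is always `some`
  match PySem.List.pyGet? parts 0, PySem.List.pyGet? parts 1 with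
  | some a, some b =>
    match PySem.Int.ofStr? a, PySem.Int.ofStr? b with
    | some x, some y => some (x, y)
    | _, _ => none
  | _, _ => none

-- ===== PORT A =====
abbrev pvGrid : Type := Array (Array Int)

-- lights[i][j]  (total form; Pre_ keeps every executed index in [0, 1000))
def pvGet (g : pvGrid) (i j : Int) : Int := (g.getD i.toNat #[]).getD j.toNat 0

-- lights[i][j] = v

def pvSet (g : pvGrid) (i j : Int) (v : Int) : pvGrid :=
  g.modify i.toNat (fun r => r.setIfInBounds j.toNat v)

def pvOnA (g : pvGrid) (x1 y1 x2 y2 : Int) : pvGrid :=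
  (PySem.List.pyRange x1 (x2 + 1)).foldl (fun g i =>
    (PySem.List.pyRange y1 (y2 + 1)).foldl (fun g j => pvSet g i j 1) g) g

def pvOffA (g : pvGrid) (x1 y1 x2 y2 : Int) : pvGrid :=
  (PySem.List.pyRange x1 (x2 + 1)).foldl (fun g i =>
    (PySem.List.pyRange y1 (y2 + 1)).foldl (fun g j =>
      if pvGet g i j > 0 then pvSet g i j 0 else g) g) g

def pvToggleA (g : pvGrid) (x1 y1 x2 y2 : Int) : pvGrid :=
  (PySem.List.pyRange x1 (x2 + 1)).foldl (fun g i =>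
    (PySem.List.pyRange y1 (y2 + 1)).foldl (fun g j =>
      pvSet g i j (1 - pvGet g i j)) g) g

def pvStepA (g : pvGrid) (line : String) : pvGrid :=
  let ins := PySem.Str.split₀ line
  if PySem.List.pyGet? ins 0 = some "turn" then
    if PySem.List.pyGet? ins 1 = some "on" then
      match (PySem.List.pyGet? ins 2).bind pvCoord?, (PySem.List.pyGet? ins 4).bind pvCoord? with
      | some (x1, y1), some (x2, y2) => pvOnA g x1 y1 x2 y2
      | _, _ => g          -- Python raises here; outside Pre_
    else if PySem.List.pyGet? ins 1 = some "off" then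
      match (PySem.List.pyGet? ins 2).bind pvCoord?, (PySem.List.pyGet? ins 4).bind pvCoord? with
      | some (x1, y1), some (x2, y2) => pvOffA g x1 y1 x2 y2
      | _, _ => g          -- Python raises here; outside Pre_
    else g
  else if PySem.List.pyGet? ins 0 = some "toggle" then
    match (PySem.List.pyGet? ins 1).bind pvCoord?, (PySem.List.pyGet? ins 3).bind pvCoord? with
    | some (x1, y1), some (x2, y2) => pvToggleA g x1 y1 x2 y2
    | _, _ => g            -- Python raises here; outside Pre_
  else g

def part1 (input : List String) : Int :=
  let g := input.foldl pvStepA (Array.replicate 1000 (Array.replicate 1000 (0 : Int)))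
  (PySem.List.pyRange 0 1000).foldl (fun total i =>
    (PySem.List.pyRange 0 1000).foldl (fun total j => total + pvGet g i j) total) 0

-- ===== PORT B =====
-- FULL = (1 << 1000) - 1
def pvFull : Nat := (1 <<< 1000) - 1

-- _popcount: c = 0; while r: c += r & 1; r >>= 1
def pvPop (r : Nat) : Nat :=
  if h : r = 0 then 0 else (r &&& 1) + pvPop (r >>> 1)
decreasing_by exact Nat.div_lt_self (Nat.pos_of_ne_zero h) (by norm_num)

-- mask = ((1 << (y2 - y1 + 1)) - 1) << y1 if 0 <= y1 <= y2 else 0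
def pvMask (y1 y2 : Int) : Nat :=
  if 0 ≤ y1 ∧ y1 ≤ y2 then ((1 <<< (y2 - y1 + 1).toNat) - 1) <<< y1.toNat else 0

-- for i in range(x1, x2+1): rows[i] |= mask / &= FULL ^ mask / ^= mask
def pvApplyB (rows : Array Nat) (op : String) (x1 x2 : Int) (mask : Nat) : Array Nat :=
  (PySem.List.pyRange x1 (x2 + 1)).foldl (fun rows i =>
    rows.modify i.toNat (fun r =>
      if op = "on" then r ||| mask
      else if op = "off" then r &&& (pvFull ^^^ mask)
      else r ^^^ mask)) rows

def pvStepB (rows : Array Nat) (line : String) : Array Nat :=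
  let w := PySem.Str.split₀ line
  let sel : Option (String × String × String) :=
    if w.take 2 = ["turn", "on"] then
      match PySem.List.pyGet? w 2, PySem.List.pyGet? w 4 with
      | some c1, some c2 => some ("on", c1, c2)
      | _, _ => none     -- Python raises here; outside Pre_
    else if w.take 2 = ["turn", "off"] then
      match PySem.List.pyGet? w 2, PySem.List.pyGet? w 4 with
      | some c1, some c2 => some ("off", c1, c2)
      | _, _ => none     -- Python raises here; outside Pre_
    else if w.take 1 = ["toggle"] then
      match PySem.List.pyGet? w 1, PySem.List.pyGet? w 3 with
      | some c1, some c2 => some ("toggle", c1, c2)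
      | _, _ => none     -- Python raises here; outside Pre_
    else none
  match sel with
  | none => rows
  | some (op, c1, c2) =>
    match pvCoord? c1, pvCoord? c2 with
    | some (x1, y1), some (x2, y2) => pvApplyB rows op x1 x2 (pvMask y1 y2)
    | _, _ => rows       -- Python raises here; outside Pre_

def part1_alt (input : List String) : Int :=
  let rows := input.foldl pvStepB (Array.replicate 1000 (0 : Nat))
  (PySem.List.pyRange 0 1000).foldl (fun total i =>
    total + (pvPop (rows.getD i.toNat 0) : Int)) 0

-- ===== PRECONDITION & SPEC =====
-- rectangle is safe: whenever both loops actually run, every touched index is on the grid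
def pvRectOK (x1 y1 x2 y2 : Int) : Bool :=
  !(x1 ≤ x2 && y1 ≤ y2) || (0 ≤ x1 && x2 < 1000 && 0 ≤ y1 && y2 < 1000)

def pvPairOK (c1 c2 : Option String) : Bool :=
  match c1.bind pvCoord?, c2.bind pvCoord? with
  | some (x1, y1), some (x2, y2) => pvRectOK x1 y1 x2 y2
  | _, _ => false

def pvLineOK (line : String) : Bool :=
  let w := PySem.Str.split₀ line
  match PySem.List.pyGet? w 0 with
  | none => false                       -- blank line: instruction[0] raises IndexError
  | some t =>
    if t = "turn" then
      match PySem.List.pyGet? w 1 with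
      | none => false                   -- instruction[1] raises IndexError
      | some s =>
        if s = "on" || s = "off" then pvPairOK (PySem.List.pyGet? w 2) (PySem.List.pyGet? w 4)
        else true
    else if t = "toggle" then pvPairOK (PySem.List.pyGet? w 1) (PySem.List.pyGet? w 3)
    else true

-- Pre_ excludes (a) lines on which the Python A raises (blank/short instruction lines, unparsable
-- coordinates, executed indices ≥ 1000 or < -1000), and (b) instructions with negative coordinates,
-- where A returns a value only because Python's negative list indexing silently wraps to the
-- opposite edge of the grid (accidental aliasing of rows/columns); B addresses cells literally.
def Pre_part1 (input : List String) : Prop := ∀ line ∈ input, pvLineOK line = true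
instance (input : List String) : Decidable (Pre_part1 input) := by unfold Pre_part1; infer_instance

def pvWitness_part1 : List String :=
  ["turn on 0,0 through 2,2", "toggle 1,1 through 3,3", "turn off 2,2 through 2,2"]

def Spec_part1 (input : List String) (out : Int) : Prop := out = part1_alt input
instance (input : List String) (out : Int) : Decidable (Spec_part1 input out) := by unfold Spec_part1; infer_instance

-- ===== CLAIM (what is proved, stated in full; the proofs are below) =====
def Claim_equal_part1 : Prop := ∀ (input : List String), Dom_part1 input → Pre_part1 input → Spec_part1 input (part1 input)

-- ===== LEMMAS AND PROOFS =====

def pvInb (i : Int) : Prop := 0 ≤ i ∧ i < 1000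

def pvSized (g : pvGrid) : Prop :=
  g.size = 1000 ∧ ∀ a : Nat, a < 1000 → (g.getD a #[]).size = 1000

-- the simulation invariant: the grid is the bit pattern of the row bitmasks
def pvInv (g : pvGrid) (rows : Array Nat) : Prop :=
  pvSized g ∧ rows.size = 1000 ∧
  (∀ a : Nat, a < 1000 → rows.getD a 0 < 2 ^ 1000) ∧
  (∀ i j : Int, pvInb i → pvInb j →
    pvGet g i j = (if (rows.getD i.toNat 0).testBit j.toNat then 1 else 0))

theorem pvTake2_iff (w : List String) (a b : String) :
    w.take 2 = [a, b] ↔ PySem.List.pyGet? w 0 = some a ∧ PySem.List.pyGet? w 1 = some b := by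
  match w with
  | [] => simp [PySem.List.pyGet?]
  | [x] =>
    have h0 : PySem.List.pyGet? [x] 0 = some x := by simpa using PySem.List.pyGet?_ofNat [x] 0 (by simp)
    have h1 : PySem.List.pyGet? [x] 1 = none := by
      rw [PySem.List.pyGet?_eq_none_iff]; simp [PySem.Raise.InRange]
    simp [h0, h1]
  | x :: y :: r =>
    have h0 : PySem.List.pyGet? (x::y::r) 0 = some x := by
      simpa using PySem.List.pyGet?_ofNat (x::y::r) 0 (by simp)
    have h1 : PySem.List.pyGet? (x::y::r) 1 = some y := by
      simpa using PySem.List.pyGet?_ofNat (x::y::r) 1 (by simp)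
    simp [h0, h1]

theorem pvTake1_iff (w : List String) (a : String) :
    w.take 1 = [a] ↔ PySem.List.pyGet? w 0 = some a := by
  match w with
  | [] => simp [PySem.List.pyGet?]
  | x :: r =>
    have h0 : PySem.List.pyGet? (x::r) 0 = some x := by
      simpa using PySem.List.pyGet?_ofNat (x::r) 0 (by simp)
    simp [h0]

theorem pvSized_set (g : pvGrid) (i j v : Int) (h : pvSized g) : pvSized (pvSet g i j v) := by
  obtain ⟨h1, h2⟩ := h
  refine ⟨by simp [pvSet, h1], fun a ha => ?_⟩
  have hrow := h2 a ha
  have hlt : a < g.size := by omega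
  rw [Array.getD_eq_getD_getElem?, Array.getElem?_eq_getElem hlt] at hrow
  simp only [Option.getD_some] at hrow
  simp only [pvSet, Array.getD_eq_getD_getElem?, Array.getElem?_modify,
    Array.getElem?_eq_getElem hlt]
  split <;> simp [Array.size_setIfInBounds, hrow]

theorem pvGet_set (g : pvGrid) (i j a b v : Int) (h : pvSized g)
    (hi : pvInb i) (hj : pvInb j) (ha : pvInb a) (hb : pvInb b) :
    pvGet (pvSet g i j v) a b = if a = i ∧ b = j then v else pvGet g a b := by
  obtain ⟨h1, h2⟩ := h
  obtain ⟨hi0, hi1⟩ := hi; obtain ⟨hj0, hj1⟩ := hj; obtain ⟨ha0, ha1⟩ := ha; obtain ⟨hb0, hb1⟩ := hb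
  have han : a.toNat < g.size := by omega
  have hin : i.toNat < g.size := by omega
  have hrowa := h2 a.toNat (by omega)
  rw [Array.getD_eq_getD_getElem?, Array.getElem?_eq_getElem han, Option.getD_some] at hrowa
  simp only [pvGet, pvSet, Array.getD_eq_getD_getElem?, Array.getElem?_modify,
    Array.getElem?_eq_getElem han, Option.map_some, Option.getD_some]
  by_cases hai : a = i
  · rw [if_pos (by omega : i.toNat = a.toNat)]
    simp only [Option.getD_some, Array.getD_eq_getD_getElem?, Array.getElem?_setIfInBounds]
    have hasub : a.toNat = i.toNat := by omega
    by_cases hbj : b = j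
    · rw [if_pos (by omega : j.toNat = b.toNat)]
      rw [if_pos (show j.toNat < g[a.toNat].size by omega)]
      simp [hai, hbj]
    · rw [if_neg (by omega : ¬ j.toNat = b.toNat)]
      simp [hai, hbj]
  · rw [if_neg (by omega : ¬ i.toNat = a.toNat)]
    simp [hai]

theorem pvRow_spec (f : pvGrid → Int → Int → pvGrid) (t : Int → Int)
    (Hs : ∀ g i j, pvSized g → pvSized (f g i j))
    (Hf : ∀ g i j a b, pvSized g → pvInb i → pvInb j → pvInb a → pvInb b →
      pvGet (f g i j) a b = if a = i ∧ b = j then t (pvGet g i j) else pvGet g a b)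
    (i : Int) (hi : pvInb i) (J : List Int) (hJ : ∀ j ∈ J, pvInb j) (hJn : J.Nodup) :
    ∀ g, pvSized g →
      pvSized (J.foldl (fun g j => f g i j) g) ∧
      ∀ a b, pvInb a → pvInb b →
        pvGet (J.foldl (fun g j => f g i j) g) a b =
          if a = i ∧ b ∈ J then t (pvGet g a b) else pvGet g a b := by
  induction J with
  | nil => intro g hg; simp [hg]
  | cons j J' ih =>
    intro g hg
    simp only [List.foldl_cons]
    have hj : pvInb j := hJ j (by simp)
    have hjJ : j ∉ J' := by simp at hJn; exact hJn.1
    have hg1 : pvSized (f g i j) := Hs g i j hg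
    obtain ⟨ihS, ihG⟩ := ih (fun x hx => hJ x (by simp [hx])) (by simp at hJn; exact hJn.2) (f g i j) hg1
    refine ⟨ihS, fun a b ha hb => ?_⟩
    rw [ihG a b ha hb, Hf g i j a b hg hi hj ha hb]
    by_cases hA : a = i
    · subst hA
      by_cases hbj : b = j
      · subst hbj
        simp [hjJ]
      · by_cases hbJ : b ∈ J' <;> simp [hbj, hbJ]
    · simp [hA]

theorem pvLoop_spec (f : pvGrid → Int → Int → pvGrid) (t : Int → Int)
    (Hs : ∀ g i j, pvSized g → pvSized (f g i j))
    (Hf : ∀ g i j a b, pvSized g → pvInb i → pvInb j → pvInb a → pvInb b →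
      pvGet (f g i j) a b = if a = i ∧ b = j then t (pvGet g i j) else pvGet g a b)
    (I J : List Int) (hI : ∀ i ∈ I, pvInb i) (hJ : ∀ j ∈ J, pvInb j)
    (hIn : I.Nodup) (hJn : J.Nodup) :
    ∀ g, pvSized g →
      pvSized (I.foldl (fun g i => J.foldl (fun g j => f g i j) g) g) ∧
      ∀ a b, pvInb a → pvInb b →
        pvGet (I.foldl (fun g i => J.foldl (fun g j => f g i j) g) g) a b =
          if a ∈ I ∧ b ∈ J then t (pvGet g a b) else pvGet g a b := by
  induction I with
  | nil => intro g hg; simp [hg]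
  | cons i I' ih =>
    intro g hg
    simp only [List.foldl_cons]
    have hi : pvInb i := hI i (by simp)
    have hiI : i ∉ I' := by simp at hIn; exact hIn.1
    obtain ⟨rS, rG⟩ := pvRow_spec f t Hs Hf i hi J hJ hJn g hg
    obtain ⟨ihS, ihG⟩ := ih (fun x hx => hI x (by simp [hx])) (by simp at hIn; exact hIn.2) _ rS
    refine ⟨ihS, fun a b ha hb => ?_⟩
    rw [ihG a b ha hb, rG a b ha hb]
    by_cases hA : a = i
    · subst hA
      simp [hiI]
    · by_cases hbA : a ∈ I' <;> by_cases hbJ : b ∈ J <;> simp [hA, hbA, hbJ]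

theorem pvLoop_nil_x (f : pvGrid → Int → Int → pvGrid) (g : pvGrid) (x1 y1 x2 y2 : Int) (h : x2 < x1) :
    (PySem.List.pyRange x1 (x2 + 1)).foldl (fun g i =>
      (PySem.List.pyRange y1 (y2 + 1)).foldl (fun g j => f g i j) g) g = g := by
  simp [PySem.List.pyRange_one_eq_nil (by omega : x2 + 1 ≤ x1)]

theorem pvLoop_nil_y (f : pvGrid → Int → Int → pvGrid) (g : pvGrid) (x1 y1 x2 y2 : Int) (h : y2 < y1) :
    (PySem.List.pyRange x1 (x2 + 1)).foldl (fun g i =>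
      (PySem.List.pyRange y1 (y2 + 1)).foldl (fun g j => f g i j) g) g = g := by
  simp only [PySem.List.pyRange_one_eq_nil (by omega : y2 + 1 ≤ y1), List.foldl_nil]
  exact PySem.List.foldl_ignore _ _

-- ===== B-side row-loop lemmas =====

-- the modify loop with an identity row-op leaves the array unchanged
theorem pvFoldModify_id (L : List Int) (rop : Nat → Nat) :
    ∀ rows : Array Nat, (∀ a : Nat, a < rows.size → rop (rows.getD a 0) = rows.getD a 0) →
      L.foldl (fun rows i => rows.modify i.toNat rop) rows = rows := by
  induction L with
  | nil => intro rows _; rfl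
  | cons i L' ih =>
    intro rows hid
    simp only [List.foldl_cons]
    have hmod : rows.modify i.toNat rop = rows := by
      apply Array.ext
      · simp
      · intro k hk _
        rw [Array.getElem_modify (by simpa using hk)]
        split
        · next heq =>
          have := hid k (by simpa using hk)
          rw [Array.getD_eq_getD_getElem?, Array.getElem?_eq_getElem (by simpa using hk),
            Option.getD_some] at this
          simpa [heq] using this
        · rfl
    rw [hmod, ih rows hid]

-- characterisation of the modify loop over a list of in-bounds indices
theorem pvFoldModify_char (L : List Int) (rop : Nat → Nat)
    (hL : ∀ i ∈ L, pvInb i) (hN : L.Nodup) :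
    ∀ rows : Array Nat, rows.size = 1000 →
      (L.foldl (fun rows i => rows.modify i.toNat rop) rows).size = 1000 ∧
      ∀ a : Nat, a < 1000 →
        (L.foldl (fun rows i => rows.modify i.toNat rop) rows).getD a 0 =
          if (a : Int) ∈ L then rop (rows.getD a 0) else rows.getD a 0 := by
  induction L with
  | nil => intro rows hs; simp [hs]
  | cons i L' ih =>
    intro rows hs
    simp only [List.foldl_cons]
    have hi : pvInb i := hL i (by simp)
    have hiL : i ∉ L' := by simp at hN; exact hN.1
    have hs1 : (rows.modify i.toNat rop).size = 1000 := by simp [hs]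
    obtain ⟨ihS, ihG⟩ := ih (fun x hx => hL x (by simp [hx])) (by simp at hN; exact hN.2)
      (rows.modify i.toNat rop) hs1
    refine ⟨ihS, fun a ha => ?_⟩
    have halt : a < rows.size := by omega
    have hget : (rows.modify i.toNat rop).getD a 0 =
        if a = i.toNat then rop (rows.getD a 0) else rows.getD a 0 := by
      rw [Array.getD_eq_getD_getElem?, Array.getElem?_modify, Array.getElem?_eq_getElem halt,
        Array.getD_eq_getD_getElem?, Array.getElem?_eq_getElem halt]
      by_cases h : a = i.toNat
      · rw [if_pos (by omega : i.toNat = a), if_pos h]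
        rfl
      · rw [if_neg (by omega : ¬ i.toNat = a), if_neg h]
    rw [ihG a ha, hget]
    obtain ⟨hi0, hi1⟩ := hi
    by_cases hai : (a : Int) = i
    · rw [if_pos (show a = i.toNat by omega)]
      rw [if_neg (show (a : Int) ∉ L' by rw [hai]; exact hiL),
        if_pos (show (a : Int) ∈ i :: L' by simp [hai])]
    · rw [if_neg (show ¬ a = i.toNat by omega)]
      by_cases hL' : (a : Int) ∈ L'
      · rw [if_pos hL', if_pos (show (a : Int) ∈ i :: L' by simp [hL'])]
      · rw [if_neg hL', if_neg (show (a : Int) ∉ i :: L' by simp [hai, hL'])]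

-- ===== bitmask characterisation =====

theorem pvMask_zero (y1 y2 : Int) (h : ¬ (0 ≤ y1 ∧ y1 ≤ y2)) : pvMask y1 y2 = 0 := by
  simp [pvMask, h]

theorem pvMask_testBit (y1 y2 : Int) (h0 : 0 ≤ y1) (h1 : y1 ≤ y2) (j : Nat) :
    (pvMask y1 y2).testBit j = decide (y1 ≤ (j : Int) ∧ (j : Int) ≤ y2) := by
  rw [pvMask, if_pos ⟨h0, h1⟩]
  rw [Nat.testBit_shiftLeft]
  rw [Nat.shiftLeft_eq, one_mul, Nat.testBit_two_pow_sub_one]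
  by_cases ha : y1.toNat ≤ j
  · by_cases hb : j - y1.toNat < (y2 - y1 + 1).toNat
    · simp only [ha, hb, decide_true, Bool.true_and]
      have : y1 ≤ (j : Int) ∧ (j : Int) ≤ y2 := by omega
      simp [this]
    · simp only [ha, hb, decide_true, decide_false, Bool.true_and]
      have : ¬ (y1 ≤ (j : Int) ∧ (j : Int) ≤ y2) := by omega
      simp [this]
  · simp only [ha, decide_false, Bool.false_and]
    have : ¬ (y1 ≤ (j : Int) ∧ (j : Int) ≤ y2) := by omega
    simp [this]

theorem pvMask_lt (y1 y2 : Int) (h0 : 0 ≤ y1) (h2 : y2 < 1000) : pvMask y1 y2 < 2 ^ 1000 := by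
  by_cases h1 : y1 ≤ y2
  · apply Nat.lt_pow_two_of_testBit
    intro i hi
    rw [pvMask_testBit y1 y2 h0 h1 i]
    have : ¬ (y1 ≤ (i : Int) ∧ (i : Int) ≤ y2) := by omega
    simp [this]
  · rw [pvMask_zero y1 y2 (by omega)]
    positivity

theorem pvFull_testBit (j : Nat) : pvFull.testBit j = decide (j < 1000) := by
  rw [pvFull, Nat.shiftLeft_eq, one_mul, Nat.testBit_two_pow_sub_one]

-- ===== the op-level simulation lemma =====

def pvApplyOne (rows : Array Nat) (rop : Nat → Nat) (x1 x2 : Int) : Array Nat :=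
  (PySem.List.pyRange x1 (x2 + 1)).foldl (fun rows i => rows.modify i.toNat rop) rows

theorem pvOp_inv (f : pvGrid → Int → Int → pvGrid) (t : Int → Int)
    (Hs : ∀ g i j, pvSized g → pvSized (f g i j))
    (Hf : ∀ g i j a b, pvSized g → pvInb i → pvInb j → pvInb a → pvInb b →
      pvGet (f g i j) a b = if a = i ∧ b = j then t (pvGet g i j) else pvGet g a b)
    (rop : Nat → Nat) (mb : Bool → Bool)
    (hT : ∀ b : Bool, t (if b then 1 else 0) = if mb b then 1 else 0)
    (x1 y1 x2 y2 : Int) (hrect : pvRectOK x1 y1 x2 y2 = true)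
    (hId : ¬ (0 ≤ y1 ∧ y1 ≤ y2) → ∀ r : Nat, r < 2 ^ 1000 → rop r = r)
    (hGood : 0 ≤ y1 → y1 ≤ y2 → y2 < 1000 → ∀ r : Nat, r < 2 ^ 1000 →
      rop r < 2 ^ 1000 ∧ ∀ j : Nat,
        (rop r).testBit j = if y1 ≤ (j : Int) ∧ (j : Int) ≤ y2 then mb (r.testBit j) else r.testBit j)
    (g : pvGrid) (rows : Array Nat) (h : pvInv g rows) :
    pvInv ((PySem.List.pyRange x1 (x2 + 1)).foldl (fun g i =>
           (PySem.List.pyRange y1 (y2 + 1)).foldl (fun g j => f g i j) g) g)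
          (pvApplyOne rows rop x1 x2) := by
  obtain ⟨hg, hrs, hrb, hcell⟩ := h
  simp only [pvApplyOne]
  by_cases hx : x1 ≤ x2
  · by_cases hy : y1 ≤ y2
    · -- executing case: grid bounds available from Pre_
      have hb : 0 ≤ x1 ∧ x2 < 1000 ∧ 0 ≤ y1 ∧ y2 < 1000 := by
        simp [pvRectOK] at hrect
        rcases hrect with h' | h' <;> omega
      have hI : ∀ i ∈ PySem.List.pyRange x1 (x2 + 1), pvInb i := by
        intro i hi; rw [PySem.List.mem_pyRange_one] at hi; exact ⟨by omega, by omega⟩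
      have hJ : ∀ j ∈ PySem.List.pyRange y1 (y2 + 1), pvInb j := by
        intro j hj; rw [PySem.List.mem_pyRange_one] at hj; exact ⟨by omega, by omega⟩
      obtain ⟨hS, hG⟩ := pvLoop_spec f t Hs Hf _ _ hI hJ
        (PySem.List.nodup_pyRange_one _ _) (PySem.List.nodup_pyRange_one _ _) g hg
      obtain ⟨hS', hG'⟩ := pvFoldModify_char (PySem.List.pyRange x1 (x2 + 1)) rop hI
        (PySem.List.nodup_pyRange_one _ _) rows hrs
      have hGood' := hGood hb.2.2.1 hy hb.2.2.2
      refine ⟨hS, hS', fun a ha => ?_, fun i j hi hj => ?_⟩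
      · rw [hG' a ha]
        split
        · exact (hGood' _ (hrb a ha)).1
        · exact hrb a ha
      · rw [hG i j hi hj, hcell i j hi hj]
        have hi0 := hi.1; have hi1 := hi.2
        have hj0 := hj.1; have hj1 := hj.2
        have hcast_i : ((i.toNat : Int)) = i := by omega
        have hcast_j : ((j.toNat : Int)) = j := by omega
        rw [hG' i.toNat (by omega : i.toNat < 1000)]
        simp only [PySem.List.mem_pyRange_one, hcast_i]
        by_cases hmi : x1 ≤ i ∧ i < x2 + 1
        · rw [if_pos hmi, (hGood' _ (hrb i.toNat (by omega : i.toNat < 1000))).2 j.toNat]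
          simp only [hcast_j]
          by_cases hmj : y1 ≤ j ∧ j ≤ y2
          · rw [if_pos (show (x1 ≤ i ∧ i < x2 + 1) ∧ y1 ≤ j ∧ j < y2 + 1 by omega),
              if_pos hmj]
            exact hT _
          · rw [if_neg (show ¬ ((x1 ≤ i ∧ i < x2 + 1) ∧ y1 ≤ j ∧ j < y2 + 1) by omega),
              if_neg hmj]
        · rw [if_neg (show ¬ ((x1 ≤ i ∧ i < x2 + 1) ∧ y1 ≤ j ∧ j < y2 + 1) by omega),
            if_neg hmi]
    · -- y-range empty: A's inner loop never runs; B's row-op is the identity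
      rw [pvLoop_nil_y f g x1 y1 x2 y2 (by omega)]
      rw [pvFoldModify_id _ rop rows
        (fun a ha => hId (by omega) _ (hrb a (by omega)))]
      exact ⟨hg, hrs, hrb, hcell⟩
  · -- x-range empty: neither loop runs
    rw [pvLoop_nil_x f g x1 y1 x2 y2 (by omega)]
    rw [PySem.List.pyRange_one_eq_nil (by omega : x2 + 1 ≤ x1), List.foldl_nil]
    exact ⟨hg, hrs, hrb, hcell⟩

-- testBit above the width is false
theorem pvHighBit (r : Nat) (hr : r < 2 ^ 1000) (j : Nat) (hj : 1000 ≤ j) : r.testBit j = false :=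
  Nat.testBit_lt_two_pow (lt_of_lt_of_le hr (Nat.pow_le_pow_right (by norm_num) hj))

theorem pvOn_inv (x1 y1 x2 y2 : Int) (hrect : pvRectOK x1 y1 x2 y2 = true)
    (g : pvGrid) (rows : Array Nat) (h : pvInv g rows) :
    pvInv (pvOnA g x1 y1 x2 y2) (pvApplyOne rows (fun r => r ||| pvMask y1 y2) x1 x2) := by
  refine pvOp_inv (fun g i j => pvSet g i j 1) (fun _ => 1)
    (fun g i j hg => pvSized_set g i j 1 hg)
    (fun g i j a b hg hi hj ha hb => pvGet_set g i j a b 1 hg hi hj ha hb)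
    (fun r => r ||| pvMask y1 y2) (fun _ => true) (fun b => by simp)
    x1 y1 x2 y2 hrect ?_ ?_ g rows h
  · intro hneg r _
    show r ||| pvMask y1 y2 = r
    rw [pvMask_zero y1 y2 hneg, Nat.or_zero]
  · intro h0 h1 h2 r hr
    refine ⟨Nat.or_lt_two_pow hr (pvMask_lt y1 y2 h0 h2), fun j => ?_⟩
    show (r ||| pvMask y1 y2).testBit j = _
    rw [Nat.testBit_or, pvMask_testBit y1 y2 h0 h1 j]
    by_cases hm : y1 ≤ (j : Int) ∧ (j : Int) ≤ y2 <;> simp [hm]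

theorem pvOff_inv (x1 y1 x2 y2 : Int) (hrect : pvRectOK x1 y1 x2 y2 = true)
    (g : pvGrid) (rows : Array Nat) (h : pvInv g rows) :
    pvInv (pvOffA g x1 y1 x2 y2)
      (pvApplyOne rows (fun r => r &&& (pvFull ^^^ pvMask y1 y2)) x1 x2) := by
  refine pvOp_inv (fun g i j => if pvGet g i j > 0 then pvSet g i j 0 else g)
    (fun x => if x > 0 then 0 else x)
    (fun g i j hg => by dsimp only; split
                        · exact pvSized_set g i j 0 hg
                        · exact hg)
    (fun g i j a b hg hi hj ha hb => by
      dsimp only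
      by_cases hpos : pvGet g i j > 0
      · rw [if_pos hpos, pvGet_set g i j a b 0 hg hi hj ha hb]
        split <;> simp_all
      · rw [if_neg hpos]
        split <;> simp_all)
    (fun r => r &&& (pvFull ^^^ pvMask y1 y2)) (fun _ => false)
    (fun b => by cases b <;> simp)
    x1 y1 x2 y2 hrect ?_ ?_ g rows h
  · intro hneg r hr
    show r &&& (pvFull ^^^ pvMask y1 y2) = r
    rw [pvMask_zero y1 y2 hneg, Nat.xor_zero, pvFull]
    rw [Nat.shiftLeft_eq, one_mul, Nat.and_two_pow_sub_one_eq_mod, Nat.mod_eq_of_lt hr]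
  · intro h0 h1 h2 r hr
    refine ⟨lt_of_le_of_lt (Nat.and_le_left) hr, fun j => ?_⟩
    show (r &&& (pvFull ^^^ pvMask y1 y2)).testBit j = _
    rw [Nat.testBit_and, Nat.testBit_xor, pvFull_testBit j, pvMask_testBit y1 y2 h0 h1 j]
    by_cases hj : j < 1000
    · by_cases hm : y1 ≤ (j : Int) ∧ (j : Int) ≤ y2 <;> simp [hj, hm]
    · have hrf : r.testBit j = false := pvHighBit r hr j (by omega)
      have : ¬ (y1 ≤ (j : Int) ∧ (j : Int) ≤ y2) := by omega
      simp [hj, this, hrf]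

theorem pvToggle_inv (x1 y1 x2 y2 : Int) (hrect : pvRectOK x1 y1 x2 y2 = true)
    (g : pvGrid) (rows : Array Nat) (h : pvInv g rows) :
    pvInv (pvToggleA g x1 y1 x2 y2)
      (pvApplyOne rows (fun r => r ^^^ pvMask y1 y2) x1 x2) := by
  refine pvOp_inv (fun g i j => pvSet g i j (1 - pvGet g i j)) (fun x => 1 - x)
    (fun g i j hg => pvSized_set g i j _ hg)
    (fun g i j a b hg hi hj ha hb => pvGet_set g i j a b _ hg hi hj ha hb)
    (fun r => r ^^^ pvMask y1 y2) (fun b => !b) (fun b => by cases b <;> simp)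
    x1 y1 x2 y2 hrect ?_ ?_ g rows h
  · intro hneg r _
    show r ^^^ pvMask y1 y2 = r
    rw [pvMask_zero y1 y2 hneg, Nat.xor_zero]
  · intro h0 h1 h2 r hr
    refine ⟨Nat.xor_lt_two_pow hr (pvMask_lt y1 y2 h0 h2), fun j => ?_⟩
    show (r ^^^ pvMask y1 y2).testBit j = _
    rw [Nat.testBit_xor, pvMask_testBit y1 y2 h0 h1 j]
    by_cases hm : y1 ≤ (j : Int) ∧ (j : Int) ≤ y2 <;> simp [hm]

-- pvApplyB with a literal op string is the generic modify loop
theorem pvApplyB_on (rows : Array Nat) (x1 x2 : Int) (m : Nat) :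
    pvApplyB rows "on" x1 x2 m = pvApplyOne rows (fun r => r ||| m) x1 x2 := by
  simp [pvApplyB, pvApplyOne]

theorem pvApplyB_off (rows : Array Nat) (x1 x2 : Int) (m : Nat) :
    pvApplyB rows "off" x1 x2 m = pvApplyOne rows (fun r => r &&& (pvFull ^^^ m)) x1 x2 := by
  simp [pvApplyB, pvApplyOne]

theorem pvApplyB_toggle (rows : Array Nat) (x1 x2 : Int) (m : Nat) :
    pvApplyB rows "toggle" x1 x2 m = pvApplyOne rows (fun r => r ^^^ m) x1 x2 := by
  simp [pvApplyB, pvApplyOne]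

theorem pvStep_inv (g : pvGrid) (rows : Array Nat) (line : String)
    (hok : pvLineOK line = true) (h : pvInv g rows) : pvInv (pvStepA g line) (pvStepB rows line) := by
  simp only [pvStepA, pvStepB]
  simp only [pvLineOK] at hok
  cases hw0 : PySem.List.pyGet? (PySem.Str.split₀ line) 0 with
  | none => rw [hw0] at hok; simp at hok
  | some tkn =>
    rw [hw0] at hok
    by_cases ht : tkn = "turn"
    · subst ht
      simp only [if_pos rfl] at hok
      rw [if_pos (hw0 ▸ rfl)]
      cases hw1 : PySem.List.pyGet? (PySem.Str.split₀ line) 1 with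
      | none => rw [hw1] at hok; simp at hok
      | some s1 =>
        rw [hw1] at hok
        have htk2on : (PySem.Str.split₀ line).take 2 = ["turn", "on"] ↔ s1 = "on" := by
          rw [pvTake2_iff]; simp [hw0, hw1]
        have htk2off : (PySem.Str.split₀ line).take 2 = ["turn", "off"] ↔ s1 = "off" := by
          rw [pvTake2_iff]; simp [hw0, hw1]
        have htk1 : ¬ (PySem.Str.split₀ line).take 1 = ["toggle"] := by
          rw [pvTake1_iff]; simp [hw0]
        by_cases hon : s1 = "on"
        · subst hon
          rw [if_pos (hw1 ▸ rfl), if_pos (htk2on.2 rfl)]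
          simp only [if_pos rfl] at hok
          cases hc1 : PySem.List.pyGet? (PySem.Str.split₀ line) 2 with
          | none => rw [pvPairOK] at hok; rw [hc1] at hok; simp at hok
          | some c1 =>
            cases hc2 : PySem.List.pyGet? (PySem.Str.split₀ line) 4 with
            | none => rw [pvPairOK] at hok; rw [hc1, hc2] at hok; cases hcc : pvCoord? c1 <;> simp [hcc] at hok
            | some c2 =>
              rw [pvPairOK, hc1, hc2] at hok
              simp only [Option.bind_some] at hok
              cases hcc1 : pvCoord? c1 with
              | none => rw [hcc1] at hok; simp at hok
              | some p1 =>
                cases hcc2 : pvCoord? c2 with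
                | none => rw [hcc1, hcc2] at hok; simp at hok
                | some p2 =>
                  obtain ⟨x1, y1⟩ := p1; obtain ⟨x2, y2⟩ := p2
                  rw [hcc1, hcc2] at hok
                  simp only [hc1, hc2, Option.bind_some, hcc1, hcc2]
                  rw [pvApplyB_on]
                  exact pvOn_inv x1 y1 x2 y2 hok g rows h
        · by_cases hoff : s1 = "off"
          · subst hoff
            rw [if_neg (show ¬ (some "off" = some "on") by decide), if_pos rfl,
              if_neg (fun hh => hon (htk2on.1 hh)), if_pos (htk2off.2 rfl)]
            simp only [if_pos rfl] at hok
            simp at hok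
            cases hc1 : PySem.List.pyGet? (PySem.Str.split₀ line) 2 with
            | none => rw [pvPairOK] at hok; rw [hc1] at hok; simp at hok
            | some c1' =>
              cases hc2 : PySem.List.pyGet? (PySem.Str.split₀ line) 4 with
              | none => rw [pvPairOK] at hok; rw [hc1, hc2] at hok; cases hcc : pvCoord? c1' <;> simp [hcc] at hok
              | some c2' =>
                rw [pvPairOK, hc1, hc2] at hok
                simp only [Option.bind_some] at hok
                cases hcc1 : pvCoord? c1' with
                | none => rw [hcc1] at hok; simp at hok
                | some p1 =>
                  cases hcc2 : pvCoord? c2' with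
                  | none => rw [hcc1, hcc2] at hok; simp at hok
                  | some p2 =>
                    obtain ⟨x1, y1⟩ := p1; obtain ⟨x2, y2⟩ := p2
                    rw [hcc1, hcc2] at hok
                    simp only [hc1, Option.bind_some, hcc1, hcc2]
                    rw [pvApplyB_off]
                    exact pvOff_inv x1 y1 x2 y2 hok g rows h
          · rw [if_neg (show ¬ (some s1 = some "on") by simp [hon]),
              if_neg (show ¬ (some s1 = some "off") by simp [hoff]),
              if_neg (fun hh => hon (htk2on.1 hh)),
              if_neg (fun hh => hoff (htk2off.1 hh)), if_neg htk1]
            exact h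
    · by_cases htog : tkn = "toggle"
      · subst htog
        rw [if_neg (show ¬ (some "toggle" = some "turn") by decide), if_pos rfl]
        have htk2on : ¬ (PySem.Str.split₀ line).take 2 = ["turn", "on"] := by
          rw [pvTake2_iff]; simp [hw0]
        have htk2off : ¬ (PySem.Str.split₀ line).take 2 = ["turn", "off"] := by
          rw [pvTake2_iff]; simp [hw0]
        have htk1 : (PySem.Str.split₀ line).take 1 = ["toggle"] := (pvTake1_iff _ _).2 hw0
        rw [if_neg htk2on, if_neg htk2off, if_pos htk1]
        simp at hok
        cases hc1 : PySem.List.pyGet? (PySem.Str.split₀ line) 1 with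
        | none => rw [pvPairOK] at hok; rw [hc1] at hok; simp at hok
        | some c1' =>
          cases hc2 : PySem.List.pyGet? (PySem.Str.split₀ line) 3 with
          | none => rw [pvPairOK] at hok; rw [hc1, hc2] at hok; cases hcc : pvCoord? c1' <;> simp [hcc] at hok
          | some c2' =>
            rw [pvPairOK, hc1, hc2] at hok
            simp only [Option.bind_some] at hok
            cases hcc1 : pvCoord? c1' with
            | none => rw [hcc1] at hok; simp at hok
            | some p1 =>
              cases hcc2 : pvCoord? c2' with
              | none => rw [hcc1, hcc2] at hok; simp at hok
              | some p2 =>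
                obtain ⟨x1, y1⟩ := p1; obtain ⟨x2, y2⟩ := p2
                rw [hcc1, hcc2] at hok
                simp only [hc1, hc2, Option.bind_some, hcc1, hcc2]
                rw [pvApplyB_toggle]
                exact pvToggle_inv x1 y1 x2 y2 hok g rows h
      · have htk2on : ¬ (PySem.Str.split₀ line).take 2 = ["turn", "on"] := by
          rw [pvTake2_iff]; simp [hw0, ht]
        have htk2off : ¬ (PySem.Str.split₀ line).take 2 = ["turn", "off"] := by
          rw [pvTake2_iff]; simp [hw0, ht]
        have htk1 : ¬ (PySem.Str.split₀ line).take 1 = ["toggle"] := by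
          rw [pvTake1_iff]; simp [hw0, htog]
        rw [if_neg (show ¬ (some tkn = some "turn") by simp [ht]),
          if_neg (show ¬ (some tkn = some "toggle") by simp [htog]),
          if_neg htk2on, if_neg htk2off, if_neg htk1]
        exact h

theorem pvBase_inv : pvInv (Array.replicate 1000 (Array.replicate 1000 (0 : Int)))
    (Array.replicate 1000 (0 : Nat)) := by
  refine ⟨⟨by simp, fun a ha => ?_⟩, by simp, fun a ha => ?_, fun i j hi hj => ?_⟩
  · rw [Array.getD_eq_getD_getElem?]
    simp [ha]
  · rw [Array.getD_eq_getD_getElem?]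
    simpa [ha] using Nat.two_pow_pos 1000
  · obtain ⟨hi0, hi1⟩ := hi
    simp only [pvGet, Array.getD_eq_getD_getElem?, Array.getElem?_replicate]
    rw [if_pos (by omega : i.toNat < 1000)]
    simp only [Option.getD_some]
    rw [if_pos (by omega : i.toNat < 1000)]
    simp only [Option.getD_some, Array.getElem?_replicate]
    split <;> simp

-- ===== the counting pass: popcount = number of set bits below the width =====

theorem pvPop_eq (k : Nat) : ∀ r : Nat, r < 2 ^ k →
    (pvPop r : Int) = ((List.range k).map (fun j => if r.testBit j then (1 : Int) else 0)).sum := by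
  induction k with
  | zero =>
    intro r hr
    have : r = 0 := by omega
    subst this
    rw [pvPop]
    simp
  | succ k ih =>
    intro r hr
    by_cases h0 : r = 0
    · subst h0
      rw [pvPop]
      simp
    · rw [pvPop, dif_neg h0]
      have hdiv : r >>> 1 < 2 ^ k := by
        rw [Nat.shiftRight_one]
        have : 2 ^ (k + 1) = 2 * 2 ^ k := by ring
        omega
      rw [List.range_succ_eq_map, List.map_cons, List.sum_cons, List.map_map]
      have hbit : ∀ j : Nat, r.testBit (j + 1) = (r >>> 1).testBit j := by
        intro j
        rw [Nat.testBit_add_one, Nat.shiftRight_one]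
      have hmap : (List.range k).map ((fun j => if r.testBit j then (1 : Int) else 0) ∘ (· + 1)) =
          (List.range k).map (fun j => if (r >>> 1).testBit j then (1 : Int) else 0) := by
        refine List.map_congr_left (fun j _ => ?_)
        simp [hbit j]
      rw [hmap, ← ih (r >>> 1) hdiv]
      have hand : r &&& 1 = if r.testBit 0 then 1 else 0 := by
        rw [Nat.and_one_is_mod, Nat.testBit_zero]
        rcases Nat.mod_two_eq_zero_or_one r with h | h <;> simp [h]
      rw [hand]
      split <;> push_cast <;> ring

set_option maxRecDepth 20000 in
theorem pvCount (g : pvGrid) (rows : Array Nat) (h : pvInv g rows) :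
    (PySem.List.pyRange 0 1000).foldl (fun total i =>
      (PySem.List.pyRange 0 1000).foldl (fun total j => total + pvGet g i j) total) 0 =
    (PySem.List.pyRange 0 1000).foldl (fun total i =>
      total + (pvPop (rows.getD i.toNat 0) : Int)) 0 := by
  obtain ⟨_, _, hrb, hcell⟩ := h
  simp only [PySem.List.foldl_add]
  congr 1
  refine congrArg List.sum (List.map_congr_left (fun i hi => ?_))
  rw [PySem.List.mem_pyRange_one] at hi
  have hib : pvInb i := ⟨hi.1, hi.2⟩
  rw [pvPop_eq 1000 (rows.getD i.toNat 0) (hrb i.toNat (by omega))]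
  rw [show (PySem.List.pyRange 0 1000).map (fun j => pvGet g i j) =
        (PySem.List.pyRange 0 1000).map (fun j =>
          if (rows.getD i.toNat 0).testBit j.toNat then (1 : Int) else 0) from
    List.map_congr_left (fun j hj => by
      rw [PySem.List.mem_pyRange_one] at hj
      exact hcell i j hib ⟨hj.1, hj.2⟩)]
  rw [PySem.List.pyRange_one]
  have h1000 : ((1000 : Int) - 0).toNat = 1000 := by decide
  rw [h1000, List.map_map]
  refine congrArg List.sum (List.map_congr_left (fun j _ => ?_))
  have hj0 : ((0 : Int) + (j : Int)).toNat = j := by omega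
  simp [hj0]

theorem pvFold_inv (ls : List String) : ∀ (g : pvGrid) (rows : Array Nat),
    (∀ l ∈ ls, pvLineOK l = true) → pvInv g rows →
    pvInv (ls.foldl pvStepA g) (ls.foldl pvStepB rows) := by
  induction ls with
  | nil => intro g rows _ h; simpa using h
  | cons l ls' ih =>
    intro g rows hok h
    simp only [List.foldl_cons]
    exact ih _ _ (fun x hx => hok x (by simp [hx]))
      (pvStep_inv g rows l (hok l (by simp)) h)

theorem pvMain (input : List String) (hpre : ∀ line ∈ input, pvLineOK line = true) :
    part1 input = part1_alt input := by
  simp only [part1, part1_alt]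
  exact pvCount _ _ (pvFold_inv input _ _ hpre pvBase_inv)

-- ===== VERDICT (by name: the statement is the Claim_ definition above) =====
theorem part1_spec : Claim_equal_part1 := by
  intro input _ hpre
  unfold Spec_part1
  exact pvMain input hpre
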